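-- pv_equiv track=rewrite | github.com/jioome/Algorithm | 프로그래머스/lv3/42895. N으로 표현/N으로 표현.py | solution
-- ===== SOURCE A (Python) =====
-- def solution(N, number):
--     if N == number :
--         return 1
--     s = [set() for _ in range(8)]
--
--     # 2. 각 set마다 기본 수 "N" * i 수 초기화
--     for x,a in enumerate(s,1):
--         a.add(int(str(N)*x))
--
--     answer = -1
--     for i in range(1,8):
--         for j in range(i):
--             for op1 in s[j]:
--                 for op2 in s[i-j-1]:
--                     s[i].add(op1 + op2)
--                     s[i].add(op1 * op2)
--                     s[i].add(op1 - op2)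
--                     if op2 != 0 :
--                         s[i].add(op1 // op2)
--
--
--         if  number in s[i] :
--             return i+1
--
--
--     return answer
-- ===== SOURCE B (Python) =====
-- def solution(N, number):
--     if N == number:
--         return 1
--     memo = {}
--
--     def reachable(k):
--         if k in memo:
--             return memo[k]
--         vals = {int(str(N) * k)}
--         for j in range(1, k):
--             for a in reachable(j):
--                 for b in reachable(k - j):
--                     for v in (a + b, a * b, a - b):
--                         vals.add(v)
--                     if b != 0:
--                         vals.add(a // b)
--         memo[k] = vals
--         return vals
--
--     for k in range(2, 9):
--         if number in reachable(k):
--             return k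
--     return -1
-- ===== Notes on version B (the rewrite author's own statement) =====
-- stated objective: alternative
-- what changed: Replaces A's bottom-up array of eight in-place-mutated sets with a top-down memoized recursion reachable(k) over the copy count, checking number at each k; same recurrence, different decomposition.
import Mathlib
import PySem

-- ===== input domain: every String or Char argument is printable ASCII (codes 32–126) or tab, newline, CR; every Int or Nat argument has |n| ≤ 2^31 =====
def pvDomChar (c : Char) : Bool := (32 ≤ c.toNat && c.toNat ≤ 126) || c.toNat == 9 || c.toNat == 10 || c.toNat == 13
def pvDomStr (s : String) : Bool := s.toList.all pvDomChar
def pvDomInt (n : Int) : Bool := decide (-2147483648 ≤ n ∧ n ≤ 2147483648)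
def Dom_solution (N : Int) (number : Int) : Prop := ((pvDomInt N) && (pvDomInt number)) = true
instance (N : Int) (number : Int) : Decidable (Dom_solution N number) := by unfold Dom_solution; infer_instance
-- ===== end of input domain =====

-- B restates A's bottom-up table of sets as a top-down memoized recursion over the copy count (alternative decomposition, same cost).


-- ===== PORT A =====
-- int(str(N)*k): both Pythons build this literal expression; exact wherever the parse succeeds
-- (N ≥ 0); where int() raises ValueError (negative N, k ≥ 2) ofStr? is none — excluded by Pre_.
-- The Python sets are consumed only through membership and by building further sets, so the
-- result never depends on iteration order; they are ported as Std.HashSet (a hash set, like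
-- Python's) to keep evaluation feasible, with 'for x in s' as a fold over toList.
def pvRep (N : Int) (k : Nat) : Int :=
  (PySem.Int.ofStr? (PySem.Str.join "" (List.replicate k (PySem.Int.toStr N)))).getD 0

-- the four adds of A's innermost loop body, in A's order
def pvOpsA (acc : Std.HashSet Int) (a b : Int) : Std.HashSet Int :=
  let acc := acc.insert (a + b)
  let acc := acc.insert (a * b)
  let acc := acc.insert (a - b)
  if b ≠ 0 then acc.insert (PySem.Int.floordiv a b) else acc

-- the body of A's 'for j in range(i)' loop: grow s[i] from s[j] × s[i-j-1]
def pvStepA (s : List (Std.HashSet Int)) (i : Nat) : Std.HashSet Int :=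
  (List.range i).foldl
    (fun acc j =>
      (s.getD j ∅).toList.foldl
        (fun acc a => (s.getD (i - j - 1) ∅).toList.foldl (fun acc b => pvOpsA acc a b) acc)
        acc)
    (s.getD i ∅)

-- A's 'for i in range(1,8)' loop with early return
def pvLoopA (number : Int) (s : List (Std.HashSet Int)) (i : Nat) : Int :=
  if i < 8 then
    if ((s.set i (pvStepA s i)).getD i ∅).contains number then (i : Int) + 1
    else pvLoopA number (s.set i (pvStepA s i)) (i + 1)
  else -1
termination_by 8 - i

def solution (N : Int) (number : Int) : Int :=
  if N == number then 1
  else pvLoopA number ((List.range 8).map (fun x => (∅ : Std.HashSet Int).insert (pvRep N (x + 1)))) 1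

-- ===== PORT B =====
-- B's innermost body: the tuple loop 'for v in (a+b, a*b, a-b)' then the guarded //
def pvOpsB (acc : Std.HashSet Int) (a b : Int) : Std.HashSet Int :=
  let acc := [a + b, a * b, a - b].foldl Std.HashSet.insert acc
  if b ≠ 0 then acc.insert (PySem.Int.floordiv a b) else acc

-- B's reachable(k): values expressible with exactly k copies of N (the Python memo dict only
-- caches; the recursion's value is identical, so it is ported as plain recursion on k)
def pvReach (N : Int) (k : Nat) : Std.HashSet Int :=
  (List.range (k - 1)).attach.foldl
    (fun acc j =>
      (pvReach N (j.1 + 1)).toList.foldl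
        (fun acc a => (pvReach N (k - (j.1 + 1))).toList.foldl (fun acc b => pvOpsB acc a b) acc)
        acc)
    ((∅ : Std.HashSet Int).insert (pvRep N k))
termination_by k
decreasing_by
  · have := j.2; simp only [List.mem_range] at this; omega
  · have := j.2; simp only [List.mem_range] at this; omega

-- B's 'for k in range(2,9)' loop
def pvLoopB (N : Int) (number : Int) (k : Nat) : Int :=
  if k < 9 then
    if (pvReach N k).contains number then (k : Int)
    else pvLoopB N number (k + 1)
  else -1
termination_by 9 - k

def solution_alt (N : Int) (number : Int) : Int :=
  if N == number then 1 else pvLoopB N number 2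

-- ===== PRECONDITION & SPEC =====
-- Pre_ excludes negative N with N ≠ number: there Python A raises ValueError in int(str(N)*k)
-- (str(N)*k like "-5-5" does not parse), and B raises the same ValueError.
def Pre_solution (N : Int) (number : Int) : Prop := N = number ∨ 0 ≤ N
instance (N : Int) (number : Int) : Decidable (Pre_solution N number) := by unfold Pre_solution; infer_instance

def pvWitness_solution : Int × Int := (5, 12)

def Spec_solution (N : Int) (number : Int) (out : Int) : Prop := out = solution_alt N number
instance (N : Int) (number : Int) (out : Int) : Decidable (Spec_solution N number out) := by unfold Spec_solution; infer_instance

-- ===== CLAIM (what is proved, stated in full; the proofs are below) =====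
def Claim_equal_solution : Prop := ∀ (N : Int) (number : Int), Dom_solution N number → Pre_solution N number → Spec_solution N number (solution N number)

-- ===== LEMMAS AND PROOFS =====

theorem pvOps_eq (acc : Std.HashSet Int) (a b : Int) : pvOpsB acc a b = pvOpsA acc a b := rfl

-- one unfolding of pvReach, with the attach-fold flattened to a plain fold over range (k-1)
theorem pvReach_eq (N : Int) (k : Nat) :
    pvReach N k =
      (List.range (k - 1)).foldl
        (fun acc j =>
          (pvReach N (j + 1)).toList.foldl
            (fun acc a => (pvReach N (k - (j + 1))).toList.foldl (fun acc b => pvOpsB acc a b) acc)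
            acc)
        ((∅ : Std.HashSet Int).insert (pvRep N k)) := by
  rw [pvReach]
  exact List.foldl_attach
    (f := fun acc j =>
      (pvReach N (j + 1)).toList.foldl
        (fun acc a => (pvReach N (k - (j + 1))).toList.foldl (fun acc b => pvOpsB acc a b) acc)
        acc)
    (b := (∅ : Std.HashSet Int).insert (pvRep N k)) (l := List.range (k - 1))

theorem pvStepA_eq_reach (N : Int) (s : List (Std.HashSet Int)) (i : Nat)
    (hlow : ∀ j, j < i → s.getD j ∅ = pvReach N (j + 1))
    (hbase : s.getD i ∅ = ((∅ : Std.HashSet Int).insert (pvRep N (i + 1)))) :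
    pvStepA s i = pvReach N (i + 1) := by
  rw [pvStepA, pvReach_eq, Nat.add_sub_cancel, hbase]
  apply PySem.List.foldl_congr_mem
  intro acc j hj
  have hji : j < i := List.mem_range.mp hj
  rw [hlow j hji]
  have h1 : i - j - 1 < i := by omega
  have h2 : i - j - 1 + 1 = i + 1 - (j + 1) := by omega
  rw [hlow _ h1, h2]
  simp only [pvOps_eq]

theorem pvLoop_eq (N number : Int) :
    ∀ (n i : Nat) (s : List (Std.HashSet Int)), i + n = 8 → 1 ≤ i → s.length = 8 →
      (∀ j, j < i → s.getD j ∅ = pvReach N (j + 1)) →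
      (∀ j, i ≤ j → j < 8 → s.getD j ∅ = ((∅ : Std.HashSet Int).insert (pvRep N (j + 1)))) →
      pvLoopA number s i = pvLoopB N number (i + 1) := by
  intro n
  induction n with
  | zero =>
    intro i s hi _ _ _ _
    have : i = 8 := by omega
    subst this
    rw [pvLoopA, pvLoopB]
    norm_num
  | succ n ih =>
    intro i s hi h1 hlen hlow hhigh
    have hi8 : i < 8 := by omega
    have hstep : pvStepA s i = pvReach N (i + 1) :=
      pvStepA_eq_reach N s i hlow (hhigh i le_rfl hi8)
    rw [pvLoopA, pvLoopB]
    have hilen : i < s.length := by omega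
    have hgetD : (s.set i (pvStepA s i)).getD i ∅ = pvReach N (i + 1) := by
      simp [List.getD, List.getElem?_set_self hilen, hstep]
    rw [if_pos hi8, if_pos (by omega : i + 1 < 9), hgetD]
    by_cases hc : (pvReach N (i + 1)).contains number = true
    · rw [if_pos hc, if_pos hc]
      push_cast
      ring
    · rw [if_neg hc, if_neg hc]
      have := ih (i + 1) (s.set i (pvStepA s i)) (by omega) (by omega)
        (by simpa using hlen)
        (fun j hj => by
          rcases Nat.lt_succ_iff_lt_or_eq.mp hj with hj' | hj'
          · rw [List.getD, List.getElem?_set_ne (by omega)]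
            exact hlow j hj'
          · subst hj'; exact hgetD)
        (fun j hj hj8 => by
          rw [List.getD, List.getElem?_set_ne (by omega)]
          exact hhigh j (by omega) hj8)
      simpa using this

theorem init_getD (N : Int) (j : Nat) (hj : j < 8) :
    (((List.range 8).map (fun x => (∅ : Std.HashSet Int).insert (pvRep N (x + 1)))).getD j ∅) =
      (∅ : Std.HashSet Int).insert (pvRep N (j + 1)) := by
  interval_cases j <;> rfl

theorem pvReach_one (N : Int) : pvReach N 1 = (∅ : Std.HashSet Int).insert (pvRep N 1) := by
  rw [pvReach_eq]
  rfl

-- ===== VERDICT (by name: the statement is the Claim_ definition above) =====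
theorem solution_spec : Claim_equal_solution := by
  intro N number _ _
  unfold Spec_solution solution solution_alt
  by_cases h : (N == number) = true
  · rw [if_pos h, if_pos h]
  · rw [if_neg h, if_neg h]
    exact pvLoop_eq N number 7 1
      ((List.range 8).map (fun x => (∅ : Std.HashSet Int).insert (pvRep N (x + 1))))
      rfl le_rfl (by simp)
      (fun j hj => by
        have : j = 0 := by omega
        subst this
        rw [init_getD N 0 (by omega), pvReach_one])
      (fun j _ hj8 => init_getD N j hj8)
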